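-- pv_equiv track=rewrite | github.com/songzy12/CodeForces | Codeforces Round #730/D2.py | compute
-- ===== SOURCE A (Python) =====
-- def compute(x, y, k):
--     # compute (y-x) mode k
--     res = 0
--     cur = 1
--     while x or y:
--         x0 = x % k
--         y0 = y % k
--         bit = (k + y0 - x0) % k
--         res += bit*cur
--         x = x // k
--         y = y // k
--         cur *= k
--     return res
-- ===== SOURCE B (Python) =====
-- def _digits(x, k):
--     ds = []
--     while x:
--         ds.append(x % k)
--         x //= k
--     return ds
--
--
-- def compute(x, y, k):
--     # phase 1: extract full base-k digit lists of x and y independently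
--     dx = _digits(x, k)
--     dy = _digits(y, k)
--     # phase 2: pad to common length and combine by Horner evaluation,
--     # most-significant digit first
--     n = max(len(dx), len(dy))
--     dx += [0] * (n - len(dx))
--     dy += [0] * (n - len(dy))
--     res = 0
--     for xd, yd in reversed(list(zip(dx, dy))):
--         res = res * k + (yd - xd) % k
--     return res
-- ===== Notes on version B (the rewrite author's own statement) =====
-- stated objective: alternative
-- what changed: A's single interleaved loop (tracking x, y, res and a running power cur) is split into two independent base-k digit-extraction loops followed by a separate combining pass that pads the digit lists to equal length and folds them most-significant-first by Horner's rule, so no power accumulator is kept.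
import Mathlib
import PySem

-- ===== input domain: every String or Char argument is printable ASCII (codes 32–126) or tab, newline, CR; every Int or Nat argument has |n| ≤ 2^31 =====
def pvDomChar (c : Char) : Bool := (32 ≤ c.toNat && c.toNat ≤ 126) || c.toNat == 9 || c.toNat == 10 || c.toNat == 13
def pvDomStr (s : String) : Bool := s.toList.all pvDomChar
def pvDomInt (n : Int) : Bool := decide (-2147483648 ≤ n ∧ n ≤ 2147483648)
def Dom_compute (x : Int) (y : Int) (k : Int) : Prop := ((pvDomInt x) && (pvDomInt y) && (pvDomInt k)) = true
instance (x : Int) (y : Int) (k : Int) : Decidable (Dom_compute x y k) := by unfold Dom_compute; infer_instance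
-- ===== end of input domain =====

-- B splits A's single interleaved loop into two independent digit-extraction loops
-- followed by a most-significant-first Horner combining pass (objective: alternative
-- decomposition, same asymptotic cost).

-- ===== PORT A =====
-- A's while-loop; the fuel argument only makes the recursion total, it is large
-- enough (see the proofs) on every input admitted by Pre_compute.
def computeLoop (fuel : Nat) (x y k res cur : Int) : Int :=
  match fuel with
  | 0 => res
  | fuel + 1 =>
    if x ≠ 0 ∨ y ≠ 0 then
      let x0 := PySem.Int.mod x k
      let y0 := PySem.Int.mod y k
      let bit := PySem.Int.mod (k + y0 - x0) k
      computeLoop fuel (PySem.Int.floordiv x k) (PySem.Int.floordiv y k) k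
        (res + bit * cur) (cur * k)
    else res

def compute (x : Int) (y : Int) (k : Int) : Int :=
  computeLoop (2 * x.natAbs + 2 * y.natAbs + 2) x y k 0 1

-- ===== PORT B =====
-- Source B's _digits: while x: ds.append(x % k); x //= k   (fuel only for totality)
def digitsB (fuel : Nat) (x k : Int) : List Int :=
  match fuel with
  | 0 => []
  | fuel + 1 =>
    if x ≠ 0 then PySem.Int.mod x k :: digitsB fuel (PySem.Int.floordiv x k) k
    else []

-- Source B's padding  dx += [0] * (n - len(dx))
def padTo (l : List Int) (n : Nat) : List Int := l ++ List.replicate (n - l.length) 0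

-- Source B's combining loop: res = res * k + (yd - xd) % k over the reversed zipped lists
def hornerBE (k : Int) (ps : List (Int × Int)) : Int :=
  ps.foldl (fun r p => r * k + PySem.Int.mod (p.2 - p.1) k) 0

def compute_alt (x : Int) (y : Int) (k : Int) : Int :=
  let dx := digitsB (2 * x.natAbs + 1) x k
  let dy := digitsB (2 * y.natAbs + 1) y k
  let n := max dx.length dy.length
  hornerBE k ((padTo dx n).zip (padTo dy n)).reverse

-- ===== PRECONDITION & SPEC =====
-- Exactly the inputs on which A terminates without raising: for k ≥ 2 it needs
-- x, y ≥ 0 (a negative argument gets stuck at -1 forever), for k ≤ -2 the loop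
-- always reaches 0, and for |k| ≤ 1 (including k = 0, where x % k would raise)
-- A returns only when the loop is never entered, i.e. x = y = 0.
def Pre_compute (x : Int) (y : Int) (k : Int) : Prop :=
  (2 ≤ k ∧ 0 ≤ x ∧ 0 ≤ y) ∨ k ≤ -2 ∨ (x = 0 ∧ y = 0)
instance (x : Int) (y : Int) (k : Int) : Decidable (Pre_compute x y k) := by
  unfold Pre_compute; infer_instance

def pvWitness_compute : Int × Int × Int := (5, 29, 3)

def Spec_compute (x : Int) (y : Int) (k : Int) (out : Int) : Prop := out = compute_alt x y k
instance (x : Int) (y : Int) (k : Int) (out : Int) : Decidable (Spec_compute x y k out) := by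
  unfold Spec_compute; infer_instance

-- ===== CLAIM (what is proved, stated in full; the proofs are below) =====
def Claim_equal_compute : Prop :=
  ∀ (x : Int) (y : Int) (k : Int), Dom_compute x y k → Pre_compute x y k →
    Spec_compute x y k (compute x y k)

-- ===== LEMMAS AND PROOFS =====

-- side condition that is preserved by one division step
def GoodK (x k : Int) : Prop := (2 ≤ k ∧ 0 ≤ x) ∨ k ≤ -2

-- termination measure of Python's  x //= k  loop
def mu (x : Int) : Nat := 2 * x.natAbs + (if 0 < x then 1 else 0)

lemma mu_le (x : Int) : mu x ≤ 2 * x.natAbs + 1 := by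
  simp only [mu]; split_ifs <;> omega

lemma mu_pos {x : Int} (hx : x ≠ 0) : 1 ≤ mu x := by
  simp only [mu]; split_ifs <;> omega

lemma goodK_step {x k : Int} (h : GoodK x k) : GoodK (PySem.Int.floordiv x k) k := by
  rcases h with ⟨hk, hx⟩ | hk
  · left
    refine ⟨hk, ?_⟩
    have h1 := PySem.Int.floordiv_mul_add_mod x k
    have h2 := PySem.Int.mod_nonneg x (b := k) (by omega)
    have h3 := PySem.Int.mod_lt x (b := k) (by omega)
    nlinarith [mul_nonneg (le_of_lt (show (0:Int) < k by omega)) hx]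
  · right; exact hk

lemma mu_floordiv_lt {x k : Int} (h : GoodK x k) (hx : x ≠ 0) :
    mu (PySem.Int.floordiv x k) < mu x := by
  have h1 := PySem.Int.floordiv_mul_add_mod x k
  set q := PySem.Int.floordiv x k with hq
  set r := PySem.Int.mod x k with hr
  rcases h with ⟨hk, hxpos⟩ | hk
  · -- k ≥ 2, x > 0 : 0 ≤ q and 2*q ≤ x
    have h2 : 0 ≤ r := PySem.Int.mod_nonneg x (by omega)
    have h3 : r < k := PySem.Int.mod_lt x (by omega)
    have hq0 : 0 ≤ q := by nlinarith
    have hq2 : 2 * q ≤ x := by nlinarith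
    simp only [mu]
    split_ifs <;> omega
  · -- k ≤ -2 : r ∈ (k, 0]
    have h2 := PySem.Int.mod_neg_bounds x (b := k) (by omega)
    rcases lt_trichotomy x 0 with hxlt | hxeq | hxgt
    · -- x < 0 : q ≥ 0 and (q = 0 or 2*q ≤ -x)
      have hq0 : 0 ≤ q := by nlinarith
      rcases eq_or_lt_of_le hq0 with hq1 | hq1
      · simp only [mu]; split_ifs <;> omega
      · have hq2 : 2 * q ≤ -x := by nlinarith
        simp only [mu]; split_ifs <;> omega
    · omega
    · -- x > 0 : q < 0 and 2*(-q) ≤ x + 1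
      have hq0 : q < 0 := by nlinarith
      have hq2 : 2 * (-q) ≤ x + 1 := by
        rcases lt_trichotomy q (-1) with h4 | h4 | h4
        · nlinarith
        · omega
        · omega
      simp only [mu]
      split_ifs <;> omega

lemma mu_floordiv_le {x k : Int} (h : GoodK x k) :
    mu (PySem.Int.floordiv x k) ≤ mu x := by
  by_cases hx : x = 0
  · subst hx; simp [PySem.Int.floordiv, mu]
  · exact le_of_lt (mu_floordiv_lt h hx)

-- the fuel argument of digitsB is irrelevant as long as it is at least mu x
lemma digitsB_fuel {k : Int} : ∀ (f g : Nat) (x : Int), GoodK x k →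
    mu x ≤ f → mu x ≤ g → digitsB f x k = digitsB g x k := by
  intro f
  induction f with
  | zero =>
    intro g x _ hf _
    have hx : x = 0 := by
      by_contra hx
      have := mu_pos hx
      omega
    subst hx
    cases g <;> simp [digitsB]
  | succ f ih =>
    intro g x hgood hf hg
    by_cases hx : x = 0
    · subst hx
      cases g <;> simp [digitsB]
    · have hmu : 1 ≤ mu x := mu_pos hx
      cases g with
      | zero => omega
      | succ g =>
        simp only [digitsB, if_pos hx]
        have hlt := mu_floordiv_lt hgood hx
        exact congrArg _ (ih g _ (goodK_step hgood) (by omega) (by omega))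

lemma digitsB_cons {x k : Int} (hgood : GoodK x k) (hx : x ≠ 0) :
    digitsB (2 * x.natAbs + 1) x k =
      PySem.Int.mod x k ::
        digitsB (2 * (PySem.Int.floordiv x k).natAbs + 1) (PySem.Int.floordiv x k) k := by
  have h1 : digitsB (2 * x.natAbs + 1) x k =
      PySem.Int.mod x k :: digitsB (2 * x.natAbs) (PySem.Int.floordiv x k) k := by
    simp [digitsB, hx]
  rw [h1]
  have hlt := mu_floordiv_lt hgood hx
  have hmu : mu x ≤ 2 * x.natAbs + 1 := mu_le x
  have hmu' := mu_le (PySem.Int.floordiv x k)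
  exact congrArg _ (digitsB_fuel _ _ _ (goodK_step hgood) (by omega) (by omega))

lemma digitsB_zero {k : Int} (f : Nat) : digitsB f 0 k = [] := by
  cases f <;> simp [digitsB]

lemma padTo_cons (a : Int) (l : List Int) (m : Nat) :
    padTo (a :: l) (m + 1) = a :: padTo l m := by
  simp [padTo]

lemma padTo_nil_succ (m : Nat) : padTo ([] : List Int) (m + 1) = 0 :: padTo [] m := by
  simp [padTo, List.replicate_succ]

-- unified head/tail shape of a padded digit list
lemma padTo_digits {x k : Int} (hgood : GoodK x k) (m : Nat) :
    padTo (digitsB (2 * x.natAbs + 1) x k) (m + 1) =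
      PySem.Int.mod x k ::
        padTo (digitsB (2 * (PySem.Int.floordiv x k).natAbs + 1)
          (PySem.Int.floordiv x k) k) m := by
  by_cases hx : x = 0
  · subst hx
    simp only [digitsB_zero]
    rw [padTo_nil_succ]
    simp [PySem.Int.floordiv, PySem.Int.mod, digitsB_zero]
  · rw [digitsB_cons hgood hx, padTo_cons]

lemma digits_length_quot {x k : Int} (hgood : GoodK x k) :
    (digitsB (2 * (PySem.Int.floordiv x k).natAbs + 1) (PySem.Int.floordiv x k) k).length =
      (digitsB (2 * x.natAbs + 1) x k).length - 1 := by
  by_cases hx : x = 0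
  · subst hx
    simp [digitsB_zero, PySem.Int.floordiv]
  · rw [digitsB_cons hgood hx]
    simp

lemma digits_ne_nil {x k : Int} (hgood : GoodK x k) (hx : x ≠ 0) :
    digitsB (2 * x.natAbs + 1) x k ≠ [] := by
  rw [digitsB_cons hgood hx]; simp

lemma hornerBE_reverse_cons (k : Int) (p : Int × Int) (ps : List (Int × Int)) :
    hornerBE k ((p :: ps).reverse) =
      hornerBE k ps.reverse * k + PySem.Int.mod (p.2 - p.1) k := by
  simp [hornerBE, List.foldl_append]

lemma mod_period (a k : Int) : PySem.Int.mod (k + a) k = PySem.Int.mod a k := by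
  simp [PySem.Int.mod]

-- one step of B: peeling the least-significant digit
lemma alt_step {x y k : Int} (hgx : GoodK x k) (hgy : GoodK y k)
    (h : x ≠ 0 ∨ y ≠ 0) :
    compute_alt x y k =
      PySem.Int.mod (k + PySem.Int.mod y k - PySem.Int.mod x k) k +
        k * compute_alt (PySem.Int.floordiv x k) (PySem.Int.floordiv y k) k := by
  have hbit : PySem.Int.mod (k + PySem.Int.mod y k - PySem.Int.mod x k) k =
      PySem.Int.mod (PySem.Int.mod y k - PySem.Int.mod x k) k := by
    have := mod_period (PySem.Int.mod y k - PySem.Int.mod x k) k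
    rw [← this]; ring_nf
  set x' := PySem.Int.floordiv x k
  set y' := PySem.Int.floordiv y k
  have hn : 1 ≤ max (digitsB (2 * x.natAbs + 1) x k).length
      (digitsB (2 * y.natAbs + 1) y k).length := by
    rcases h with hx | hy
    · have := digits_ne_nil hgx hx
      have : 1 ≤ (digitsB (2 * x.natAbs + 1) x k).length :=
        by cases hd : digitsB (2 * x.natAbs + 1) x k <;> simp_all
      omega
    · have := digits_ne_nil hgy hy
      have : 1 ≤ (digitsB (2 * y.natAbs + 1) y k).length :=
        by cases hd : digitsB (2 * y.natAbs + 1) y k <;> simp_all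
      omega
  have hlenx := digits_length_quot hgx
  have hleny := digits_length_quot hgy
  simp only [compute_alt]
  set n := max (digitsB (2 * x.natAbs + 1) x k).length
      (digitsB (2 * y.natAbs + 1) y k).length with hndef
  set n' := max (digitsB (2 * x'.natAbs + 1) x' k).length
      (digitsB (2 * y'.natAbs + 1) y' k).length with hn'def
  have hnn' : n = n' + 1 := by
    rw [hndef, hn'def, hlenx, hleny]; omega
  rw [hnn', padTo_digits hgx n', padTo_digits hgy n', List.zip_cons_cons,
    hornerBE_reverse_cons, hbit]
  ring

lemma compute_alt_zero (k : Int) : compute_alt 0 0 k = 0 := by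
  simp [compute_alt, digitsB_zero, padTo, hornerBE]

-- loop invariant: A's loop accumulates res + cur * (B's value of the remaining state)
lemma loop_eq {k : Int} : ∀ (fuel : Nat) (x y res cur : Int), GoodK x k → GoodK y k →
    mu x + mu y ≤ fuel →
    computeLoop fuel x y k res cur = res + cur * compute_alt x y k := by
  intro fuel
  induction fuel with
  | zero =>
    intro x y res cur _ _ hf
    have hx : x = 0 ∧ y = 0 := by
      constructor <;> (by_contra hc; have := mu_pos hc; omega)
    rw [hx.1, hx.2, compute_alt_zero]
    simp [computeLoop]
  | succ fuel ih =>
    intro x y res cur hgx hgy hf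
    by_cases h : x ≠ 0 ∨ y ≠ 0
    · simp only [computeLoop, if_pos h]
      have hfx : mu (PySem.Int.floordiv x k) + mu (PySem.Int.floordiv y k) ≤ fuel := by
        rcases h with hx | hy
        · have := mu_floordiv_lt hgx hx
          have := mu_floordiv_le hgy
          omega
        · have := mu_floordiv_lt hgy hy
          have := mu_floordiv_le hgx
          omega
      rw [ih _ _ _ _ (goodK_step hgx) (goodK_step hgy) hfx, alt_step hgx hgy h]
      ring
    · simp only [ne_eq, not_or, not_not] at h
      rw [h.1, h.2, compute_alt_zero]
      simp [computeLoop]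

-- ===== VERDICT (by name: the statement is the Claim_ definition above) =====
theorem compute_spec : Claim_equal_compute := by
  intro x y k _ hpre
  unfold Spec_compute compute
  rcases hpre with ⟨hk, hx, hy⟩ | hk | ⟨hx, hy⟩
  · rw [loop_eq _ x y 0 1 (Or.inl ⟨hk, hx⟩) (Or.inl ⟨hk, hy⟩) (by have := mu_le x; have := mu_le y; omega)]
    ring
  · rw [loop_eq _ x y 0 1 (Or.inr hk) (Or.inr hk) (by have := mu_le x; have := mu_le y; omega)]
    ring
  · rw [hx, hy, compute_alt_zero]
    simp [computeLoop]
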